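-- pv_equiv track=rewrite | github.com/DieNice/JGT | translator/syntacticalanalyzer/semanticanalyzer/semanticalanalyzer.py | __istransformable
-- ===== SOURCE A (Python) =====
-- def __istransformable(typefrom: str, typeto: str) -> bool:
--     if typefrom == typeto:
--         return True
--     transfomations = {
--         'byte': ['short', 'boolean'],
--         'short': ['int', 'boolean'],
--         'char': ['int', 'boolean'],
--         'int': ['long', 'double', 'float', 'boolean'],
--         'long': ['double', 'float', 'boolean'],
--         'float': ['double', 'boolean'],
--         'double': ['boolean'],
--         'boolean': [],
--     }
--     def search(tmp: str, typeto: str):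
--         for t in transfomations[tmp]:
--             if t == typeto:
--                 return True
--             elif search(t, typeto):
--                 return True
--         return False
--     return search(typefrom, typeto)
-- ===== SOURCE B (Python) =====
-- def __istransformable(typefrom: str, typeto: str) -> bool:
--     if typefrom == typeto:
--         return True
--     # The widening graph is a chain byte < short/char < int < long < float <
--     # double < boolean, so reachability is a rank comparison; the only caveat
--     # is that nothing converts TO char. Indexing rank[typefrom] directly keeps
--     # the KeyError on an unknown typefrom.
--     rank = {'byte': 0, 'short': 1, 'char': 1, 'int': 2,
--             'long': 3, 'float': 4, 'double': 5, 'boolean': 6}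
--     r = rank[typefrom]
--     return typeto != 'char' and typeto in rank and r < rank[typeto]
-- ===== Notes on version B (the rewrite author's own statement) =====
-- stated objective: alternative
-- what changed: Replaced the recursive graph search over the transformation dict by a closed-form rank comparison (each type gets a level in the widening chain; convertible iff the target's rank is higher and the target is not 'char'); Pre_ excludes unknown typefrom (with typefrom != typeto), where both A and B raise KeyError.
import Mathlib
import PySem

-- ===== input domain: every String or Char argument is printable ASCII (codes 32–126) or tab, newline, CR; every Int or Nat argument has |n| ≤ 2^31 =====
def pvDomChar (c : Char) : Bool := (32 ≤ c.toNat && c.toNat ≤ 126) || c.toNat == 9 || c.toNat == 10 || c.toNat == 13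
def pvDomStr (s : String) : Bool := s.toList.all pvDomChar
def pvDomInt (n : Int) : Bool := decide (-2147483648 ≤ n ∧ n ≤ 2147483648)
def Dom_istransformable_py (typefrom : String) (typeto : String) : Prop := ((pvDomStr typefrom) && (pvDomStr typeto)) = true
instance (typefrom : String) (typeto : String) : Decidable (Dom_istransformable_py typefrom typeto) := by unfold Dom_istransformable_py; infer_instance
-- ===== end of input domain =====

-- B replaces A's recursive graph search by a closed-form rank comparison on the widening chain (alternative).

-- ===== PORT A =====
-- the hardcoded dict as a lookup function; [] for 'boolean' and for unknown keys
-- (an unknown typefrom raises KeyError in Python; those inputs are excluded by Pre_)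
def pvTransfA (s : String) : List String :=
  if s == "byte" then ["short", "boolean"]
  else if s == "short" then ["int", "boolean"]
  else if s == "char" then ["int", "boolean"]
  else if s == "int" then ["long", "double", "float", "boolean"]
  else if s == "long" then ["double", "float", "boolean"]
  else if s == "float" then ["double", "boolean"]
  else if s == "double" then ["boolean"]
  else []

-- A's recursive `search`, with a fuel parameter for termination only: the dict is a
-- fixed DAG whose longest chain has length < 8, so fuel 8 is never exhausted.
def pvSearchA : Nat → String → String → Bool
  | 0, _, _ => false
  | n + 1, tmp, typeto =>
      (pvTransfA tmp).any (fun t => t == typeto || pvSearchA n t typeto)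

def istransformable_py (typefrom : String) (typeto : String) : Bool :=
  if typefrom == typeto then true
  else pvSearchA 8 typefrom typeto

-- ===== PORT B =====
-- Source B's `rank` dict; none = the key is absent (rank[typefrom] then raises KeyError
-- in Python; those inputs are excluded by Pre_)
def pvRankB (s : String) : Option Nat :=
  if s == "byte" then some 0
  else if s == "short" then some 1
  else if s == "char" then some 1
  else if s == "int" then some 2
  else if s == "long" then some 3
  else if s == "float" then some 4
  else if s == "double" then some 5
  else if s == "boolean" then some 6
  else none

def istransformable_py_alt (typefrom : String) (typeto : String) : Bool :=
  if typefrom == typeto then true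
  else
    match pvRankB typefrom with
    | none => false   -- KeyError in Python; outside Pre_
    | some r =>
      !(typeto == "char") &&
        (match pvRankB typeto with
         | some r2 => decide (r < r2)   -- typeto in rank and r < rank[typeto]
         | none => false)

-- ===== PRECONDITION & SPEC =====
-- Pre_ excludes exactly the inputs where Python A raises KeyError: typefrom not a key
-- of the dict while typefrom ≠ typeto (B raises KeyError there too).
def Pre_istransformable_py (typefrom : String) (typeto : String) : Prop :=
  typefrom = typeto ∨
    typefrom ∈ (["byte", "short", "char", "int", "long", "float", "double", "boolean"] : List String)
instance (typefrom : String) (typeto : String) : Decidable (Pre_istransformable_py typefrom typeto) := by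
  unfold Pre_istransformable_py; infer_instance

def pvWitness_istransformable_py : String × String := ("byte", "double")

def Spec_istransformable_py (typefrom : String) (typeto : String) (out : Bool) : Prop := out = istransformable_py_alt typefrom typeto
instance (typefrom : String) (typeto : String) (out : Bool) : Decidable (Spec_istransformable_py typefrom typeto out) := by unfold Spec_istransformable_py; infer_instance

-- ===== CLAIM (what is proved, stated in full; the proofs are below) =====
def Claim_equal_istransformable_py : Prop := ∀ (typefrom : String) (typeto : String), Dom_istransformable_py typefrom typeto → Pre_istransformable_py typefrom typeto → Spec_istransformable_py typefrom typeto (istransformable_py typefrom typeto)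

-- ===== LEMMAS AND PROOFS =====

-- If typeto is none of the type names, both sides are false.
theorem pv_out_of_names (tf tt : String)
    (hmem : tf ∈ (["byte", "short", "char", "int", "long", "float", "double", "boolean"] : List String))
    (h1 : tt ≠ "byte") (h2 : tt ≠ "short") (h3 : tt ≠ "char") (h4 : tt ≠ "int")
    (h5 : tt ≠ "long") (h6 : tt ≠ "float") (h7 : tt ≠ "double") (h8 : tt ≠ "boolean") :
    istransformable_py tf tt = istransformable_py_alt tf tt := by
  have e1 : (("byte" : String) == tt) = false := by simp [Ne.symm h1]
  have e2 : (("short" : String) == tt) = false := by simp [Ne.symm h2]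
  have e3 : (("char" : String) == tt) = false := by simp [Ne.symm h3]
  have e4 : (("int" : String) == tt) = false := by simp [Ne.symm h4]
  have e5 : (("long" : String) == tt) = false := by simp [Ne.symm h5]
  have e6 : (("float" : String) == tt) = false := by simp [Ne.symm h6]
  have e7 : (("double" : String) == tt) = false := by simp [Ne.symm h7]
  have e8 : (("boolean" : String) == tt) = false := by simp [Ne.symm h8]
  have f1 : ((tt : String) == "byte") = false := by simp [h1]
  have f2 : ((tt : String) == "short") = false := by simp [h2]
  have f3 : ((tt : String) == "char") = false := by simp [h3]
  have f4 : ((tt : String) == "int") = false := by simp [h4]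
  have f5 : ((tt : String) == "long") = false := by simp [h5]
  have f6 : ((tt : String) == "float") = false := by simp [h6]
  have f7 : ((tt : String) == "double") = false := by simp [h7]
  have f8 : ((tt : String) == "boolean") = false := by simp [h8]
  fin_cases hmem <;>
    simp [istransformable_py, istransformable_py_alt, pvSearchA, pvTransfA, pvRankB,
      e1, e2, e3, e4, e5, e6, e7, e8, f1, f2, f3, f4, f5, f6, f7, f8]

-- ===== VERDICT (by name: the statement is the Claim_ definition above) =====
theorem istransformable_py_spec : Claim_equal_istransformable_py := by
  intro tf tt _ pre
  unfold Spec_istransformable_py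
  by_cases he : tf = tt
  · subst he; simp [istransformable_py, istransformable_py_alt]
  · have hmem := pre.resolve_left he
    by_cases h1 : tt = "byte"
    · subst h1; fin_cases hmem <;> decide
    by_cases h2 : tt = "short"
    · subst h2; fin_cases hmem <;> decide
    by_cases h3 : tt = "char"
    · subst h3; fin_cases hmem <;> decide
    by_cases h4 : tt = "int"
    · subst h4; fin_cases hmem <;> decide
    by_cases h5 : tt = "long"
    · subst h5; fin_cases hmem <;> decide
    by_cases h6 : tt = "float"
    · subst h6; fin_cases hmem <;> decide
    by_cases h7 : tt = "double"
    · subst h7; fin_cases hmem <;> decide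
    by_cases h8 : tt = "boolean"
    · subst h8; fin_cases hmem <;> decide
    exact pv_out_of_names tf tt hmem h1 h2 h3 h4 h5 h6 h7 h8
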